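-- pv_equiv track=rewrite | github.com/sksmslhy/Java_Lexical_and_Syntax_Analyzer | DFA/Comparison.py | isComparison
-- ===== SOURCE A (Python) =====
-- COMPARISON = ['<', '>', '!', '=']
--
-- def isComparison(token):
--     state = ['T0', 'T1', 'T2', 'T3', 'T4', 'T5']
--     locate = state[0]
--     for value in token:
--         if locate == state[0]:
--             if value in COMPARISON[0] :
--                 locate = state[2]
--             elif value in COMPARISON[1] :
--                 locate = state[1]
--             elif value in COMPARISON[2] :
--                 locate = state[3]
--             elif value in COMPARISON[3] :
--                 locate = state[4]
--             else : return False
--         elif locate == state [1] :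
--             if value in COMPARISON[3] :
--                 locate = state[5]
--             else : return False
--         elif locate == state [2] :
--             if value in COMPARISON[3] :
--                 locate = state[5]
--             else : return False
--         elif locate == state [3] :
--             if value in COMPARISON[3] :
--                 locate = state[5]
--             else : return False
--         elif locate == state [4] :
--             if value in COMPARISON[3] :
--                 locate = state[5]
--             else : return False
--     if locate == state[1] or locate == state[2] or locate == state[5]:
--         return True
--     else:
--         return False
-- ===== SOURCE B (Python) =====
-- def isComparison(token):
--     n = len(token)
--     if n == 0:
--         return False
--     if n == 1:
--         return token in ('<', '>')
--     return token[0] in ('<', '>', '!', '=') and token[1] == '='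
-- ===== Notes on version B (the rewrite author's own statement) =====
-- stated objective: simpler
-- what changed: Replaced the six-state DFA loop over all characters with direct length and first/second-character checks (the DFA's accepting state T5 is sticky, so only the first two characters matter).
import Mathlib
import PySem

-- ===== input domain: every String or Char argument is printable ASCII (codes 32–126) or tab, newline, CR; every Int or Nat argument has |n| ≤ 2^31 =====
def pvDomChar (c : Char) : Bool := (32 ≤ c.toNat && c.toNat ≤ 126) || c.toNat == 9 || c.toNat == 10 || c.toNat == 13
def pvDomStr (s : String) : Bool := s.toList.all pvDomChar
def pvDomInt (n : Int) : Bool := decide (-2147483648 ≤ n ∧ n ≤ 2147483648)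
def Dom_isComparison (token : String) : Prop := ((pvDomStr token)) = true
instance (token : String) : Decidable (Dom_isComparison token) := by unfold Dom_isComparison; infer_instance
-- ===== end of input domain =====

-- B replaces A's six-state DFA loop with direct length and first/second-character checks (simpler; return value only).

-- ===== PORT A =====
-- the DFA loop of A: state labels are the Python strings "T0".."T5"; `none` models an early `return False`
def isComparisonLoop : List Char → String → Option String
  | [], locate => some locate
  | value :: rest, locate =>
    if locate = "T0" then
      if value = '<' then isComparisonLoop rest "T2"
      else if value = '>' then isComparisonLoop rest "T1"
      else if value = '!' then isComparisonLoop rest "T3"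
      else if value = '=' then isComparisonLoop rest "T4"
      else none
    else if locate = "T1" then
      if value = '=' then isComparisonLoop rest "T5" else none
    else if locate = "T2" then
      if value = '=' then isComparisonLoop rest "T5" else none
    else if locate = "T3" then
      if value = '=' then isComparisonLoop rest "T5" else none
    else if locate = "T4" then
      if value = '=' then isComparisonLoop rest "T5" else none
    else isComparisonLoop rest locate

def isComparison (token : String) : Bool :=
  match isComparisonLoop token.toList "T0" with
  | none => false
  | some locate => locate = "T1" || locate = "T2" || locate = "T5"

-- ===== PORT B =====
def isComparison_alt (token : String) : Bool :=
  match token.toList with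
  | [] => false
  | [c] => c = '<' || c = '>'
  | c0 :: c1 :: _ => (c0 = '<' || c0 = '>' || c0 = '!' || c0 = '=') && c1 = '='

-- ===== PRECONDITION & SPEC =====
def Spec_isComparison (token : String) (out : Bool) : Prop := out = isComparison_alt token
instance (token : String) (out : Bool) : Decidable (Spec_isComparison token out) := by unfold Spec_isComparison; infer_instance

-- ===== CLAIM (what is proved, stated in full; the proofs are below) =====
def Claim_equal_isComparison : Prop := ∀ (token : String), Dom_isComparison token → Spec_isComparison token (isComparison token)

-- ===== LEMMAS AND PROOFS =====

-- state T5 is sticky: no branch of the loop matches it, so the loop finishes in T5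
theorem isComparisonLoop_T5 (cs : List Char) : isComparisonLoop cs "T5" = some "T5" := by
  induction cs with
  | nil => rfl
  | cons c cs ih => simp [isComparisonLoop, ih]

-- ===== VERDICT (by name: the statement is the Claim_ definition above) =====
theorem isComparison_spec : Claim_equal_isComparison := by
  unfold Claim_equal_isComparison
  intro token _
  unfold Spec_isComparison isComparison isComparison_alt
  match h : token.toList with
  | [] => rfl
  | [c] =>
    by_cases h1 : c = '<' <;> by_cases h2 : c = '>' <;>
      by_cases h3 : c = '!' <;> by_cases h4 : c = '=' <;>
      simp_all [isComparisonLoop]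
  | c0 :: c1 :: rest =>
    by_cases h1 : c0 = '<' <;> by_cases h2 : c0 = '>' <;>
      by_cases h3 : c0 = '!' <;> by_cases h4 : c0 = '=' <;>
      by_cases h5 : c1 = '=' <;>
      simp_all [isComparisonLoop, isComparisonLoop_T5]
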